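-- pv_equiv track=rewrite | github.com/rockit2ya/nba_prediction_engine | schedule_scraper.py | normalize_team
-- ===== SOURCE A (Python) =====
-- ABBREV_TO_FULL = {
--     'ATL': 'Atlanta Hawks',    'BOS': 'Boston Celtics',    'BKN': 'Brooklyn Nets',
--     'CHA': 'Charlotte Hornets','CHI': 'Chicago Bulls',     'CLE': 'Cleveland Cavaliers',
--     'DAL': 'Dallas Mavericks', 'DEN': 'Denver Nuggets',    'DET': 'Detroit Pistons',
--     'GSW': 'Golden State Warriors', 'GS': 'Golden State Warriors',
--     'HOU': 'Houston Rockets',  'IND': 'Indiana Pacers',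
--     'LAC': 'Los Angeles Clippers', 'LAL': 'Los Angeles Lakers',
--     'MEM': 'Memphis Grizzlies','MIA': 'Miami Heat',        'MIL': 'Milwaukee Bucks',
--     'MIN': 'Minnesota Timberwolves', 'NOP': 'New Orleans Pelicans',
--     'NO': 'New Orleans Pelicans',
--     'NYK': 'New York Knicks',  'NY': 'New York Knicks',
--     'OKC': 'Oklahoma City Thunder', 'ORL': 'Orlando Magic',
--     'PHI': 'Philadelphia 76ers','PHX': 'Phoenix Suns',     'PHO': 'Phoenix Suns',
--     'POR': 'Portland Trail Blazers',
--     'SAC': 'Sacramento Kings',  'SAS': 'San Antonio Spurs', 'SA': 'San Antonio Spurs',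
--     'TOR': 'Toronto Raptors',   'UTA': 'Utah Jazz',         'WAS': 'Washington Wizards',
--     'WSH': 'Washington Wizards',
-- }
--
-- CITY_TO_FULL = {
--     'Atlanta': 'Atlanta Hawks',        'Boston': 'Boston Celtics',
--     'Brooklyn': 'Brooklyn Nets',       'Charlotte': 'Charlotte Hornets',
--     'Chicago': 'Chicago Bulls',        'Cleveland': 'Cleveland Cavaliers',
--     'Dallas': 'Dallas Mavericks',      'Denver': 'Denver Nuggets',
--     'Detroit': 'Detroit Pistons',      'Golden State': 'Golden State Warriors',
--     'Houston': 'Houston Rockets',      'Indiana': 'Indiana Pacers',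
--     'LA': 'Los Angeles Clippers',     'Los Angeles': 'Los Angeles Lakers',
--     'Memphis': 'Memphis Grizzlies',    'Miami': 'Miami Heat',
--     'Milwaukee': 'Milwaukee Bucks',    'Minnesota': 'Minnesota Timberwolves',
--     'New Orleans': 'New Orleans Pelicans', 'New York': 'New York Knicks',
--     'Oklahoma City': 'Oklahoma City Thunder', 'Orlando': 'Orlando Magic',
--     'Philadelphia': 'Philadelphia 76ers', 'Phoenix': 'Phoenix Suns',
--     'Portland': 'Portland Trail Blazers',
--     'Sacramento': 'Sacramento Kings',  'San Antonio': 'San Antonio Spurs',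
--     'Toronto': 'Toronto Raptors',      'Utah': 'Utah Jazz',
--     'Washington': 'Washington Wizards',
-- }
--
-- NBA_TEAM_NAMES = {
--     'Hawks': 'Atlanta Hawks',       'Celtics': 'Boston Celtics',
--     'Nets': 'Brooklyn Nets',        'Hornets': 'Charlotte Hornets',
--     'Bulls': 'Chicago Bulls',       'Cavaliers': 'Cleveland Cavaliers',
--     'Mavericks': 'Dallas Mavericks','Nuggets': 'Denver Nuggets',
--     'Pistons': 'Detroit Pistons',   'Warriors': 'Golden State Warriors',
--     'Rockets': 'Houston Rockets',   'Pacers': 'Indiana Pacers',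
--     'Clippers': 'Los Angeles Clippers', 'Lakers': 'Los Angeles Lakers',
--     'Grizzlies': 'Memphis Grizzlies','Heat': 'Miami Heat',
--     'Bucks': 'Milwaukee Bucks',     'Timberwolves': 'Minnesota Timberwolves',
--     'Pelicans': 'New Orleans Pelicans','Knicks': 'New York Knicks',
--     'Thunder': 'Oklahoma City Thunder','Magic': 'Orlando Magic',
--     '76ers': 'Philadelphia 76ers',  'Suns': 'Phoenix Suns',
--     'Trail Blazers': 'Portland Trail Blazers',
--     'Kings': 'Sacramento Kings',    'Spurs': 'San Antonio Spurs',
--     'Raptors': 'Toronto Raptors',   'Jazz': 'Utah Jazz',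
--     'Wizards': 'Washington Wizards',
-- }
--
-- def normalize_team(name):
--     """Normalize any team name format to canonical full name."""
--     name = name.strip()
--     # Direct lookups
--     if name in ABBREV_TO_FULL:
--         return ABBREV_TO_FULL[name]
--     if name in CITY_TO_FULL:
--         return CITY_TO_FULL[name]
--     if name in NBA_TEAM_NAMES:
--         return NBA_TEAM_NAMES[name]
--     # Handle special case: "LA Clippers" -> "Los Angeles Clippers"
--     if name == 'LA Clippers':
--         return 'Los Angeles Clippers'
--     # Check if it's already a full name
--     all_full = set(ABBREV_TO_FULL.values()) | set(CITY_TO_FULL.values())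
--     if name in all_full:
--         return name
--     # Fuzzy: check if any full name contains this string
--     for full in sorted(all_full):
--         if name.lower() == full.lower():
--             return full
--     return name  # Return as-is if no match
-- ===== SOURCE B (Python) =====
-- # Alternative structure: instead of A's category-ordered cascade of three dicts,
-- # a special case, a set union and a sorted fuzzy scan, B keeps ONE per-team
-- # record list (canonical full name + its exact-match aliases) and makes a single
-- # linear scan, matching each record by alias or case-insensitive full name.
-- # Correct because alias keys are disjoint across teams and no alias lowercases
-- # to another team's full name, so every input matches at most one record.
--
-- TEAMS = [
--     ('Atlanta Hawks',          ['ATL', 'Atlanta', 'Hawks']),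
--     ('Boston Celtics',         ['BOS', 'Boston', 'Celtics']),
--     ('Brooklyn Nets',          ['BKN', 'Brooklyn', 'Nets']),
--     ('Charlotte Hornets',      ['CHA', 'Charlotte', 'Hornets']),
--     ('Chicago Bulls',          ['CHI', 'Chicago', 'Bulls']),
--     ('Cleveland Cavaliers',    ['CLE', 'Cleveland', 'Cavaliers']),
--     ('Dallas Mavericks',       ['DAL', 'Dallas', 'Mavericks']),
--     ('Denver Nuggets',         ['DEN', 'Denver', 'Nuggets']),
--     ('Detroit Pistons',        ['DET', 'Detroit', 'Pistons']),
--     ('Golden State Warriors',  ['GSW', 'GS', 'Golden State', 'Warriors']),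
--     ('Houston Rockets',        ['HOU', 'Houston', 'Rockets']),
--     ('Indiana Pacers',         ['IND', 'Indiana', 'Pacers']),
--     ('Los Angeles Clippers',   ['LAC', 'LA', 'LA Clippers', 'Clippers']),
--     ('Los Angeles Lakers',     ['LAL', 'Los Angeles', 'Lakers']),
--     ('Memphis Grizzlies',      ['MEM', 'Memphis', 'Grizzlies']),
--     ('Miami Heat',             ['MIA', 'Miami', 'Heat']),
--     ('Milwaukee Bucks',        ['MIL', 'Milwaukee', 'Bucks']),
--     ('Minnesota Timberwolves', ['MIN', 'Minnesota', 'Timberwolves']),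
--     ('New Orleans Pelicans',   ['NOP', 'NO', 'New Orleans', 'Pelicans']),
--     ('New York Knicks',        ['NYK', 'NY', 'New York', 'Knicks']),
--     ('Oklahoma City Thunder',  ['OKC', 'Oklahoma City', 'Thunder']),
--     ('Orlando Magic',          ['ORL', 'Orlando', 'Magic']),
--     ('Philadelphia 76ers',     ['PHI', 'Philadelphia', '76ers']),
--     ('Phoenix Suns',           ['PHX', 'PHO', 'Phoenix', 'Suns']),
--     ('Portland Trail Blazers', ['POR', 'Portland', 'Trail Blazers']),
--     ('Sacramento Kings',       ['SAC', 'Sacramento', 'Kings']),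
--     ('San Antonio Spurs',      ['SAS', 'SA', 'San Antonio', 'Spurs']),
--     ('Toronto Raptors',        ['TOR', 'Toronto', 'Raptors']),
--     ('Utah Jazz',              ['UTA', 'Utah', 'Jazz']),
--     ('Washington Wizards',     ['WAS', 'WSH', 'Washington', 'Wizards']),
-- ]
--
-- def normalize_team(name):
--     """Normalize any team name format to canonical full name."""
--     name = name.strip()
--     low = name.lower()
--     for full, aliases in TEAMS:
--         if name in aliases or low == full.lower():
--             return full
--     return name  # Return as-is if no match
-- ===== Notes on version B (the rewrite author's own statement) =====
-- stated objective: alternative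
-- what changed: Replaces A's category-major cascade (three dicts probed in order, a special-case branch, a set union built and sorted on every call, then a linear fuzzy scan) with a team-major single pass: one fixed list of 30 per-team records (canonical full name + its exact aliases) scanned once, matching each record by alias membership or case-insensitive full name; correct because alias keys are disjoint across teams so the traversal order does not matter.
import Mathlib
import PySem

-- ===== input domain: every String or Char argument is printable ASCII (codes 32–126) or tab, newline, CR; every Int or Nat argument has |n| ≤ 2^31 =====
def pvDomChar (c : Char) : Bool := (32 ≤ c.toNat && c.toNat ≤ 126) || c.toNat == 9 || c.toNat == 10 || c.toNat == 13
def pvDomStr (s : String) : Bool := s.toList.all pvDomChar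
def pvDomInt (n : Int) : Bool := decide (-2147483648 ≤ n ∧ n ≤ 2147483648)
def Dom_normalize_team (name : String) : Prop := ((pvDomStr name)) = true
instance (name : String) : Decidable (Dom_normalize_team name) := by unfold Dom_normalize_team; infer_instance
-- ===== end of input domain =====

-- B replaces A's category-ordered dict cascade + sorted fuzzy scan by a single
-- scan over 30 per-team records (alternative structure, same cost).

-- ===== PORT A =====
def abbrevList : List (String × String) := [("ATL", "Atlanta Hawks"),
  ("BOS", "Boston Celtics"),
  ("BKN", "Brooklyn Nets"),
  ("CHA", "Charlotte Hornets"),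
  ("CHI", "Chicago Bulls"),
  ("CLE", "Cleveland Cavaliers"),
  ("DAL", "Dallas Mavericks"),
  ("DEN", "Denver Nuggets"),
  ("DET", "Detroit Pistons"),
  ("GSW", "Golden State Warriors"),
  ("GS", "Golden State Warriors"),
  ("HOU", "Houston Rockets"),
  ("IND", "Indiana Pacers"),
  ("LAC", "Los Angeles Clippers"),
  ("LAL", "Los Angeles Lakers"),
  ("MEM", "Memphis Grizzlies"),
  ("MIA", "Miami Heat"),
  ("MIL", "Milwaukee Bucks"),
  ("MIN", "Minnesota Timberwolves"),
  ("NOP", "New Orleans Pelicans"),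
  ("NO", "New Orleans Pelicans"),
  ("NYK", "New York Knicks"),
  ("NY", "New York Knicks"),
  ("OKC", "Oklahoma City Thunder"),
  ("ORL", "Orlando Magic"),
  ("PHI", "Philadelphia 76ers"),
  ("PHX", "Phoenix Suns"),
  ("PHO", "Phoenix Suns"),
  ("POR", "Portland Trail Blazers"),
  ("SAC", "Sacramento Kings"),
  ("SAS", "San Antonio Spurs"),
  ("SA", "San Antonio Spurs"),
  ("TOR", "Toronto Raptors"),
  ("UTA", "Utah Jazz"),
  ("WAS", "Washington Wizards"),
  ("WSH", "Washington Wizards")]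

def cityList : List (String × String) := [("Atlanta", "Atlanta Hawks"),
  ("Boston", "Boston Celtics"),
  ("Brooklyn", "Brooklyn Nets"),
  ("Charlotte", "Charlotte Hornets"),
  ("Chicago", "Chicago Bulls"),
  ("Cleveland", "Cleveland Cavaliers"),
  ("Dallas", "Dallas Mavericks"),
  ("Denver", "Denver Nuggets"),
  ("Detroit", "Detroit Pistons"),
  ("Golden State", "Golden State Warriors"),
  ("Houston", "Houston Rockets"),
  ("Indiana", "Indiana Pacers"),
  ("LA", "Los Angeles Clippers"),
  ("Los Angeles", "Los Angeles Lakers"),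
  ("Memphis", "Memphis Grizzlies"),
  ("Miami", "Miami Heat"),
  ("Milwaukee", "Milwaukee Bucks"),
  ("Minnesota", "Minnesota Timberwolves"),
  ("New Orleans", "New Orleans Pelicans"),
  ("New York", "New York Knicks"),
  ("Oklahoma City", "Oklahoma City Thunder"),
  ("Orlando", "Orlando Magic"),
  ("Philadelphia", "Philadelphia 76ers"),
  ("Phoenix", "Phoenix Suns"),
  ("Portland", "Portland Trail Blazers"),
  ("Sacramento", "Sacramento Kings"),
  ("San Antonio", "San Antonio Spurs"),
  ("Toronto", "Toronto Raptors"),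
  ("Utah", "Utah Jazz"),
  ("Washington", "Washington Wizards")]

def nickList : List (String × String) := [("Hawks", "Atlanta Hawks"),
  ("Celtics", "Boston Celtics"),
  ("Nets", "Brooklyn Nets"),
  ("Hornets", "Charlotte Hornets"),
  ("Bulls", "Chicago Bulls"),
  ("Cavaliers", "Cleveland Cavaliers"),
  ("Mavericks", "Dallas Mavericks"),
  ("Nuggets", "Denver Nuggets"),
  ("Pistons", "Detroit Pistons"),
  ("Warriors", "Golden State Warriors"),
  ("Rockets", "Houston Rockets"),
  ("Pacers", "Indiana Pacers"),
  ("Clippers", "Los Angeles Clippers"),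
  ("Lakers", "Los Angeles Lakers"),
  ("Grizzlies", "Memphis Grizzlies"),
  ("Heat", "Miami Heat"),
  ("Bucks", "Milwaukee Bucks"),
  ("Timberwolves", "Minnesota Timberwolves"),
  ("Pelicans", "New Orleans Pelicans"),
  ("Knicks", "New York Knicks"),
  ("Thunder", "Oklahoma City Thunder"),
  ("Magic", "Orlando Magic"),
  ("76ers", "Philadelphia 76ers"),
  ("Suns", "Phoenix Suns"),
  ("Trail Blazers", "Portland Trail Blazers"),
  ("Kings", "Sacramento Kings"),
  ("Spurs", "San Antonio Spurs"),
  ("Raptors", "Toronto Raptors"),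
  ("Jazz", "Utah Jazz"),
  ("Wizards", "Washington Wizards")]

def abbrevToFull : PySem.Dict String String := PySem.Dict.ofList abbrevList
def cityToFull : PySem.Dict String String := PySem.Dict.ofList cityList
def nbaTeamNames : PySem.Dict String String := PySem.Dict.ofList nickList

-- all_full = set(ABBREV_TO_FULL.values()) | set(CITY_TO_FULL.values())
def allFull : PySem.Set String :=
  PySem.Set.union (PySem.Set.ofList abbrevToFull.values) (PySem.Set.ofList cityToFull.values)

-- 'for full in sorted(all_full): if name.lower() == full.lower(): return full' / 'return name'
def fuzzyLoop (name : String) : List String → String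
  | [] => name
  | f :: rest =>
      if PySem.Str.lower name == PySem.Str.lower f then f else fuzzyLoop name rest

-- body of A after 'name = name.strip()' (n is the stripped name)
def normABody (n : String) : String :=
  match abbrevToFull.get? n with
  | some v => v
  | none =>
    match cityToFull.get? n with
    | some v => v
    | none =>
      match nbaTeamNames.get? n with
      | some v => v
      | none =>
        if n == "LA Clippers" then "Los Angeles Clippers"
        else if PySem.Set.contains allFull n then n
        else fuzzyLoop n (PySem.List.sorted allFull (fun x => x) false)

def normalize_team (name : String) : String := normABody (PySem.Str.strip name)

-- ===== PORT B =====
-- one record per team: (canonical full name, exact-match aliases)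
def teamsList : List (String × List String) := [
  ("Atlanta Hawks",          ["ATL", "Atlanta", "Hawks"]),
  ("Boston Celtics",         ["BOS", "Boston", "Celtics"]),
  ("Brooklyn Nets",          ["BKN", "Brooklyn", "Nets"]),
  ("Charlotte Hornets",      ["CHA", "Charlotte", "Hornets"]),
  ("Chicago Bulls",          ["CHI", "Chicago", "Bulls"]),
  ("Cleveland Cavaliers",    ["CLE", "Cleveland", "Cavaliers"]),
  ("Dallas Mavericks",       ["DAL", "Dallas", "Mavericks"]),
  ("Denver Nuggets",         ["DEN", "Denver", "Nuggets"]),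
  ("Detroit Pistons",        ["DET", "Detroit", "Pistons"]),
  ("Golden State Warriors",  ["GSW", "GS", "Golden State", "Warriors"]),
  ("Houston Rockets",        ["HOU", "Houston", "Rockets"]),
  ("Indiana Pacers",         ["IND", "Indiana", "Pacers"]),
  ("Los Angeles Clippers",   ["LAC", "LA", "LA Clippers", "Clippers"]),
  ("Los Angeles Lakers",     ["LAL", "Los Angeles", "Lakers"]),
  ("Memphis Grizzlies",      ["MEM", "Memphis", "Grizzlies"]),
  ("Miami Heat",             ["MIA", "Miami", "Heat"]),
  ("Milwaukee Bucks",        ["MIL", "Milwaukee", "Bucks"]),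
  ("Minnesota Timberwolves", ["MIN", "Minnesota", "Timberwolves"]),
  ("New Orleans Pelicans",   ["NOP", "NO", "New Orleans", "Pelicans"]),
  ("New York Knicks",        ["NYK", "NY", "New York", "Knicks"]),
  ("Oklahoma City Thunder",  ["OKC", "Oklahoma City", "Thunder"]),
  ("Orlando Magic",          ["ORL", "Orlando", "Magic"]),
  ("Philadelphia 76ers",     ["PHI", "Philadelphia", "76ers"]),
  ("Phoenix Suns",           ["PHX", "PHO", "Phoenix", "Suns"]),
  ("Portland Trail Blazers", ["POR", "Portland", "Trail Blazers"]),
  ("Sacramento Kings",       ["SAC", "Sacramento", "Kings"]),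
  ("San Antonio Spurs",      ["SAS", "SA", "San Antonio", "Spurs"]),
  ("Toronto Raptors",        ["TOR", "Toronto", "Raptors"]),
  ("Utah Jazz",              ["UTA", "Utah", "Jazz"]),
  ("Washington Wizards",     ["WAS", "WSH", "Washington", "Wizards"])]

-- 'for full, aliases in TEAMS: if name in aliases or low == full.lower(): return full' / 'return name'
def scanTeams (n low : String) : List (String × List String) → String
  | [] => n
  | (full, aliases) :: rest =>
      if aliases.contains n || low == PySem.Str.lower full then full
      else scanTeams n low rest

def normalize_team_alt (name : String) : String :=
  let n := PySem.Str.strip name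
  scanTeams n (PySem.Str.lower n) teamsList

-- ===== PRECONDITION & SPEC =====
def Spec_normalize_team (name : String) (out : String) : Prop := out = normalize_team_alt name
instance (name : String) (out : String) : Decidable (Spec_normalize_team name out) := by unfold Spec_normalize_team; infer_instance

-- ===== CLAIM (what is proved, stated in full; the proofs are below) =====
def Claim_equal_normalize_team : Prop := ∀ (name : String), Dom_normalize_team name → Spec_normalize_team name (normalize_team name)

-- ===== LEMMAS AND PROOFS =====

-- every exact key either program consults
def allKeys : List String := teamsList.flatMap (fun r => r.2)

theorem str_beq_comm (a b : String) : (a == b) = (b == a) := by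
  by_cases h : a = b
  · subst h; rfl
  · simp [h, Ne.symm h]

-- on the finitely many exact keys both sides agree (checked key by key)
set_option maxRecDepth 2000000 in
set_option maxHeartbeats 8000000 in
theorem keys_case : ∀ n ∈ allKeys, normABody n = scanTeams n (PySem.Str.lower n) teamsList := by
  decide

set_option maxRecDepth 1000000 in
theorem abbrev_mk : abbrevToFull = PySem.Dict.mk abbrevList := by decide
set_option maxRecDepth 1000000 in
theorem city_mk : cityToFull = PySem.Dict.mk cityList := by decide
set_option maxRecDepth 1000000 in
theorem nick_mk : nbaTeamNames = PySem.Dict.mk nickList := by decide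

theorem get?_mk_none (l : List (String × String)) (n : String)
    (h : ∀ p ∈ l, (p.1 == n) = false) : (PySem.Dict.mk l).get? n = none := by
  induction l with
  | nil => rfl
  | cons p t ih =>
      rw [PySem.Dict.get?_mk_cons, h p (List.mem_cons_self ..)]
      exact ih (fun q hq => h q (List.mem_cons_of_mem _ hq))

def canonical : List String := ["Atlanta Hawks",
  "Boston Celtics",
  "Brooklyn Nets",
  "Charlotte Hornets",
  "Chicago Bulls",
  "Cleveland Cavaliers",
  "Dallas Mavericks",
  "Denver Nuggets",
  "Detroit Pistons",
  "Golden State Warriors",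
  "Houston Rockets",
  "Indiana Pacers",
  "Los Angeles Clippers",
  "Los Angeles Lakers",
  "Memphis Grizzlies",
  "Miami Heat",
  "Milwaukee Bucks",
  "Minnesota Timberwolves",
  "New Orleans Pelicans",
  "New York Knicks",
  "Oklahoma City Thunder",
  "Orlando Magic",
  "Philadelphia 76ers",
  "Phoenix Suns",
  "Portland Trail Blazers",
  "Sacramento Kings",
  "San Antonio Spurs",
  "Toronto Raptors",
  "Utah Jazz",
  "Washington Wizards"]

set_option maxRecDepth 1000000 in
theorem canonical_pairwise_toList : canonical.Pairwise (fun a b : String => a.toList < b.toList) := by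
  decide

theorem canonical_pairwise : canonical.Pairwise (fun a b : String => a < b) :=
  canonical_pairwise_toList.imp (fun hab => String.lt_iff_toList_lt.mpr hab)

set_option maxRecDepth 1000000 in
theorem canonical_perm : canonical.Perm allFull := by decide

theorem sorted_allFull : PySem.List.sorted allFull (fun x => x) false = canonical :=
  PySem.List.sorted_eq_of_perm_of_pairwise_lt allFull canonical (fun x => x) canonical_perm canonical_pairwise

theorem fuzzy_eq_find (n : String) (L : List String) :
    fuzzyLoop n L = (L.find? (fun f => PySem.Str.lower f == PySem.Str.lower n)).getD n := by
  induction L with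
  | nil => simp [fuzzyLoop]
  | cons f t ih =>
      by_cases h : (PySem.Str.lower f == PySem.Str.lower n) = true
      · rw [List.find?_cons_of_pos (p := fun f => PySem.Str.lower f == PySem.Str.lower n) h]
        simp only [fuzzyLoop, str_beq_comm (PySem.Str.lower n) (PySem.Str.lower f), h, if_true,
          Option.getD_some]
      · rw [List.find?_cons_of_neg (p := fun f => PySem.Str.lower f == PySem.Str.lower n)
          (by simpa using h)]
        simp only [fuzzyLoop, str_beq_comm (PySem.Str.lower n) (PySem.Str.lower f),
          Bool.not_eq_true] at *
        simp [h, ih]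

set_option maxRecDepth 1000000 in
theorem canonical_lower_nodup : (canonical.map PySem.Str.lower).Nodup := by decide

theorem find?_self_of_mem (n : String) (L : List String)
    (hnd : (L.map PySem.Str.lower).Nodup) (hmem : n ∈ L) :
    L.find? (fun f => PySem.Str.lower f == PySem.Str.lower n) = some n := by
  induction L with
  | nil => cases hmem
  | cons f t ih =>
      simp only [List.map_cons, List.nodup_cons] at hnd
      by_cases h : (PySem.Str.lower f == PySem.Str.lower n) = true
      · rw [List.find?_cons_of_pos (p := fun f => PySem.Str.lower f == PySem.Str.lower n) h]
        rcases List.mem_cons.mp hmem with rfl | hmt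
        · rfl
        · exact absurd (by rw [beq_iff_eq] at h; rw [h]; exact List.mem_map_of_mem hmt) hnd.1
      · rw [List.find?_cons_of_neg (p := fun f => PySem.Str.lower f == PySem.Str.lower n)
          (by simpa using h)]
        rcases List.mem_cons.mp hmem with rfl | hmt
        · simp at h
        · exact ih hnd.2 hmt

-- every dict key / the special key is one of the aliases
set_option maxRecDepth 1000000 in
theorem abbrev_keys_sub : ∀ p ∈ abbrevList, p.1 ∈ allKeys := by decide
set_option maxRecDepth 1000000 in
theorem city_keys_sub : ∀ p ∈ cityList, p.1 ∈ allKeys := by decide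
set_option maxRecDepth 1000000 in
theorem nick_keys_sub : ∀ p ∈ nickList, p.1 ∈ allKeys := by decide
set_option maxRecDepth 1000000 in
theorem la_mem_allKeys : "LA Clippers" ∈ allKeys := by decide
set_option maxRecDepth 1000000 in
theorem teams_fst_eq_canonical : teamsList.map Prod.fst = canonical := by decide

theorem scanTeams_eq_find (n low : String) (L : List (String × List String))
    (h : ∀ r ∈ L, n ∉ r.2) :
    scanTeams n low L = ((L.find? (fun r => low == PySem.Str.lower r.1)).map Prod.fst).getD n := by
  induction L with
  | nil => rfl
  | cons r t ih =>
      obtain ⟨full, aliases⟩ := r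
      have hna : aliases.contains n = false := by
        simpa using h (full, aliases) (List.mem_cons_self ..)
      simp only [scanTeams, hna, Bool.false_or, List.find?_cons]
      by_cases hl : (low == PySem.Str.lower full) = true
      · simp [hl]
      · simp only [hl, Bool.false_eq_true, if_false]
        exact ih (fun q hq => h q (List.mem_cons_of_mem _ hq))

theorem core_eq (n : String) : normABody n = scanTeams n (PySem.Str.lower n) teamsList := by
  by_cases hk : n ∈ allKeys
  · exact keys_case n hk
  · -- no exact key matches: both sides reduce to the case-insensitive full-name search
    have hno : ∀ p ∈ teamsList, n ∉ p.2 := by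
      intro r hr hmem
      exact hk (List.mem_flatMap.mpr ⟨r, hr, hmem⟩)
    have hkey : ∀ (l : List (String × String)), (∀ p ∈ l, p.1 ∈ allKeys) →
        ∀ p ∈ l, (p.1 == n) = false := by
      intro l hsub p hp
      by_cases h : p.1 = n
      · exact absurd (h ▸ hsub p hp) hk
      · simpa using h
    have h1 : abbrevToFull.get? n = none := by
      rw [abbrev_mk]; exact get?_mk_none _ _ (hkey _ abbrev_keys_sub)
    have h2 : cityToFull.get? n = none := by
      rw [city_mk]; exact get?_mk_none _ _ (hkey _ city_keys_sub)
    have h3 : nbaTeamNames.get? n = none := by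
      rw [nick_mk]; exact get?_mk_none _ _ (hkey _ nick_keys_sub)
    have h4 : (n == "LA Clippers") = false := by
      by_cases h : n = "LA Clippers"
      · exact absurd (h ▸ la_mem_allKeys) hk
      · simpa using h
    rw [scanTeams_eq_find n (PySem.Str.lower n) teamsList hno]
    unfold normABody
    rw [h1, h2, h3, h4]
    simp only [Bool.false_eq_true, if_false]
    rw [sorted_allFull, fuzzy_eq_find]
    have hfind : canonical.find? (fun f => PySem.Str.lower f == PySem.Str.lower n) =
        (teamsList.find? (fun r => PySem.Str.lower n == PySem.Str.lower r.1)).map Prod.fst := by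
      have hcomm : (fun f => PySem.Str.lower f == PySem.Str.lower n) =
          (fun f => PySem.Str.lower n == PySem.Str.lower f) :=
        funext fun f => str_beq_comm _ _
      rw [hcomm, ← teams_fst_eq_canonical, List.find?_map]
      rfl
    cases hc : PySem.Set.contains allFull n with
    | true =>
        have hmem : n ∈ canonical :=
          canonical_perm.mem_iff.mpr ((PySem.Set.contains_iff allFull n).mp hc)
        simp only [if_true]
        rw [← hfind, find?_self_of_mem n canonical canonical_lower_nodup hmem]
        rfl
    | false =>
        simp only [Bool.false_eq_true, if_false]
        rw [hfind]

-- ===== VERDICT (by name: the statement is the Claim_ definition above) =====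
theorem normalize_team_spec : Claim_equal_normalize_team := by
  intro name _
  unfold Spec_normalize_team normalize_team normalize_team_alt
  exact core_eq (PySem.Str.strip name)
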